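-- pv_equiv track=rewrite | github.com/Aasthaengg/IBMdataset | Python_codes/p04012/s511229987.py | beautiful
-- ===== SOURCE A (Python) =====
-- from collections import defaultdict as dd
--
-- def beautiful(s):
--     D = dd(lambda:0)
--     for c in s:
--         D[c] += 1
--     if any(d&1 for d in D.values()):
--         return False
--     else:
--         return True
-- ===== SOURCE B (Python) =====
-- def beautiful(s):
--     t = sorted(s)
--     i = 0
--     while i < len(t):
--         if i + 1 == len(t) or t[i] != t[i + 1]:
--             return False
--         i += 2
--     return True
-- ===== Notes on version B (the rewrite author's own statement) =====
-- stated objective: alternative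
-- what changed: B sorts the characters and walks the sorted list with an index two at a time, returning False on the first unequal adjacent pair (or a leftover singleton), instead of building a count dictionary and scanning its values for an odd one.
import Mathlib
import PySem

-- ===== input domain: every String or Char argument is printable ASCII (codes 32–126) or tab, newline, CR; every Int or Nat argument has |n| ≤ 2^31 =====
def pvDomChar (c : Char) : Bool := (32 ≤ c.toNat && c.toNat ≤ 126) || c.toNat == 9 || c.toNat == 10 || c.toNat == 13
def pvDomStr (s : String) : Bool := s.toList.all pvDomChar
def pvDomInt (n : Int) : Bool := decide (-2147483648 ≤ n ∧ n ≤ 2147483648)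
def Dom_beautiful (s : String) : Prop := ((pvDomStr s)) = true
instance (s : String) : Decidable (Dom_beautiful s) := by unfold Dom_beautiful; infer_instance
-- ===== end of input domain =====

-- B sorts the characters and consumes the sorted list two at a time (fail on an unequal adjacent
-- pair or a leftover singleton) instead of building a count dictionary and scanning for an odd value.

-- ===== PORT A =====
-- D = defaultdict(int); for c in s: D[c] += 1; return not any(d&1 for d in D.values())
def beautiful (s : String) : Bool :=
  let D : PySem.Dict Char Int :=
    s.toList.foldl (fun d c => d.modify c 0 (· + 1)) PySem.Dict.empty
  if D.values.any (fun d => PySem.Int.band d 1 ≠ 0) then false else true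

-- ===== PORT B =====
-- i = 0; while i < len(t): if i+1 == len(t) or t[i] != t[i+1]: return False; i += 2  -- return True
-- (indices are provably in range inside the guard, so in-bound getElem is exact here)
def scanIdx (t : List Char) (i : Nat) : Bool :=
  if h : i < t.length then
    if h1 : i + 1 = t.length then false
    else if t[i] ≠ t[i + 1]'(by omega) then false
    else scanIdx t (i + 2)
  else true
termination_by t.length - i

-- t = sorted(s); then the index while loop above starting at i = 0
def beautiful_alt (s : String) : Bool :=
  scanIdx (PySem.List.sorted s.toList (fun c => c) false) 0

-- ===== PRECONDITION & SPEC =====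
def Spec_beautiful (s : String) (out : Bool) : Prop := out = beautiful_alt s
instance (s : String) (out : Bool) : Decidable (Spec_beautiful s out) := by unfold Spec_beautiful; infer_instance

-- ===== CLAIM (what is proved, stated in full; the proofs are below) =====
def Claim_equal_beautiful : Prop := ∀ (s : String), Dom_beautiful s → Spec_beautiful s (beautiful s)

-- ===== LEMMAS AND PROOFS =====

-- PySem.Int.band with 1 tests parity of a (nonnegative) count
theorem band_count (n : Nat) : (PySem.Int.band (n : Int) 1 = 0) ↔ n % 2 = 0 := by
  rw [PySem.Int.band_one]
  simp [PySem.Int.mod, Int.fmod_eq_emod]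
  omega

-- A computes "every occurring character has an even count", via the counter dictionary
theorem a_iff (s : String) :
    beautiful s = true ↔ ∀ c ∈ s.toList, s.toList.count c % 2 = 0 := by
  unfold beautiful
  have hcounter :
      s.toList.foldl (fun d c => d.modify c 0 (· + 1)) PySem.Dict.empty
        = PySem.Dict.counter s.toList := rfl
  simp only [hcounter]
  have hvals : (PySem.Dict.counter s.toList).values
      = ((PySem.Set.ofList s.toList).map (fun k => (s.toList.count k : Int))) := by
    have := PySem.Dict.items_counter (xs := s.toList)
    simp only [PySem.Dict.values, this, List.map_map]
    rfl
  rw [hvals]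
  have hif : ∀ b : Bool, (if b = true then false else true) = !b := by
    intro b; cases b <;> rfl
  rw [hif]
  simp only [Bool.not_eq_true', List.any_map, List.any_eq_false, Function.comp,
    decide_eq_true_eq, not_not]
  constructor
  · intro h c hc
    have := h c ((PySem.Set.mem_ofList _ _).2 hc)
    exact (band_count _).1 (by simpa using this)
  · intro h c hmem
    have hc : c ∈ s.toList := (PySem.Set.mem_ofList _ _).1 hmem
    simpa using (band_count _).2 (h c hc)

-- the index loop scans the suffix t.drop i two at a time; abstractly:
def pairScan : List Char → Bool
  | [] => true
  | [_] => false
  | a :: b :: r => if a ≠ b then false else pairScan r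

theorem scanIdx_eq_pairScan (t : List Char) (i : Nat) :
    scanIdx t i = pairScan (t.drop i) := by
  rw [scanIdx]
  split
  · next h =>
    have hd1 : t.drop i = t[i] :: t.drop (i + 1) := (List.getElem_cons_drop h).symm
    split
    · next h1 =>
      have : t.drop (i + 1) = [] := List.drop_eq_nil_of_le (by omega)
      rw [hd1, this]; rfl
    · next h1 =>
      have h1' : i + 1 < t.length := by omega
      have hd2 : t.drop (i + 1) = t[i + 1] :: t.drop (i + 2) :=
        (List.getElem_cons_drop h1').symm
      rw [hd1, hd2]
      by_cases hne : t[i] ≠ t[i + 1]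
      · rw [if_pos hne]; simp [pairScan, hne]
      · rw [if_neg hne, scanIdx_eq_pairScan t (i + 2)]
        simp only [pairScan, if_neg hne]
  · next h =>
    have : t.drop i = [] := List.drop_eq_nil_of_le (by omega)
    rw [this]; rfl
termination_by t.length - i

-- on a sorted list, the pair scan succeeds exactly when every count is even
theorem pairScan_iff (l : List Char) (hs : l.Pairwise (· ≤ ·)) :
    pairScan l = true ↔ ∀ c : Char, l.count c % 2 = 0 := by
  induction l using pairScan.induct with
  | case1 => simp [pairScan]
  | case2 a =>
    simp only [pairScan]
    refine iff_of_false (by simp) ?_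
    intro h
    have := h a
    simp at this
  | case3 a b r hab =>
    simp only [pairScan, if_pos hab]
    refine iff_of_false (by simp) ?_
    intro h
    have hle : a ≤ b := (List.pairwise_cons.1 hs).1 b (by simp)
    have hlt : a < b := lt_of_le_of_ne hle hab
    have hbr : ∀ x ∈ r, b ≤ x := (List.pairwise_cons.1 (List.pairwise_cons.1 hs).2).1
    have hanr : a ∉ r := fun hm => absurd (hbr a hm) (not_le.2 hlt)
    have := h a
    simp [Ne.symm hab, List.count_eq_zero_of_not_mem hanr] at this
  | case4 a b r hab ih =>
    push Not at hab
    subst hab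
    have hr : r.Pairwise (· ≤ ·) := (List.pairwise_cons.1 (List.pairwise_cons.1 hs).2).2
    simp only [pairScan]
    rw [if_neg (fun h => h rfl), ih hr]
    constructor
    · intro h c
      by_cases hc : c = a
      · subst hc; have := h c; simp at this ⊢; omega
      · have := h c; simp [List.count_cons] at this ⊢; omega
    · intro h c
      by_cases hc : c = a
      · subst hc; have := h c; simp at this ⊢; omega
      · have := h c; simp [List.count_cons] at this ⊢; omega

-- B computes the same predicate: sorting preserves counts, the scan checks their parity
theorem alt_iff (s : String) :
    beautiful_alt s = true ↔ ∀ c ∈ s.toList, s.toList.count c % 2 = 0 := by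
  unfold beautiful_alt
  have hperm : (PySem.List.sorted s.toList (fun c => c) false).Perm s.toList :=
    PySem.List.sorted_perm s.toList (fun c => c) false
  have hpw : (PySem.List.sorted s.toList (fun c => c) false).Pairwise (· ≤ ·) := by
    simpa using PySem.List.sorted_pairwise (xs := s.toList) (key := fun c : Char => c)
  rw [scanIdx_eq_pairScan, List.drop_zero, pairScan_iff _ hpw]
  constructor
  · intro h c _; rw [← hperm.count_eq]; exact h c
  · intro h c
    by_cases hc : c ∈ s.toList
    · rw [hperm.count_eq]; exact h c hc
    · rw [hperm.count_eq, List.count_eq_zero_of_not_mem hc]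

-- ===== VERDICT (by name: the statement is the Claim_ definition above) =====
theorem beautiful_spec : Claim_equal_beautiful := by
  intro s _
  unfold Spec_beautiful
  by_cases h : ∀ c ∈ s.toList, s.toList.count c % 2 = 0
  · rw [(a_iff s).2 h, ((alt_iff s).2 h).symm]
  · have ha : beautiful s ≠ true := fun hh => h ((a_iff s).1 hh)
    have hb : beautiful_alt s ≠ true := fun hh => h ((alt_iff s).1 hh)
    simp only [Bool.not_eq_true] at ha hb
    rw [ha, hb]
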